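-- pv_equiv track=rewrite | github.com/Fornacula/recognitor | recognitor.py | read_south_east_diagonals
-- ===== SOURCE A (Python) =====
-- def read_south_east_diagonals(matrix):
--     rows = len(matrix)
--     cols = len(matrix[0])
--     south_east_diagonals = []
--
--     for d in range(rows + cols - 1):
--         diagonal = []
--         if d < cols:
--             i, j = 0, cols - d - 1
--         else:
--             i, j = d - cols + 1, 0
--         while i < rows and j < cols:
--             diagonal.append(matrix[i][j])
--             i += 1
--             j += 1
--         south_east_diagonals.append(diagonal)
--
--     return south_east_diagonals
-- ===== SOURCE B (Python) =====
-- def read_south_east_diagonals(matrix):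
--     rows = len(matrix)
--     cols = len(matrix[0])
--     groups = {}
--     for i in range(rows):
--         row = matrix[i]
--         for j in range(cols):
--             groups.setdefault(i - j, []).append(row[j])
--     return [groups.get(k, []) for k in range(-(cols - 1), rows)]
-- ===== Notes on version B (the rewrite author's own statement) =====
-- stated objective: idiomatic
-- what changed: B traverses the matrix row-major once, grouping entries into a dict keyed by i-j, then reads the diagonals off range(-(cols-1), rows), instead of A's per-diagonal case-split start point and while-loop walk.
import Mathlib
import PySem

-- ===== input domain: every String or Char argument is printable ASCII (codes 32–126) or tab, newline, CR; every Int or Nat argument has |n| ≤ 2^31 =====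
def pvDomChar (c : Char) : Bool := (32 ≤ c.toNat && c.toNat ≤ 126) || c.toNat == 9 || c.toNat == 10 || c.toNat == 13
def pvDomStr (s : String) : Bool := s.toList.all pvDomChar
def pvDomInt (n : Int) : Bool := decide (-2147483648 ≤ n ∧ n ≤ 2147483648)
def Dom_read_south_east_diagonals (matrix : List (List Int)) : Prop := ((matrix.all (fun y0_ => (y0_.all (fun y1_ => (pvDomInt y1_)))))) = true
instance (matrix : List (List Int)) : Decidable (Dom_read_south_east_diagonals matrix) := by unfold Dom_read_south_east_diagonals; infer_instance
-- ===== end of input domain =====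

-- B replaces A's per-diagonal start-point case split and while-loop walk by a single
-- row-major pass grouping entries into a dict keyed by i - j (idiomatic, same cost).

-- ===== PORT A =====
-- the while loop 'while i < rows and j < cols: diagonal.append(matrix[i][j]); i += 1; j += 1'
def seWalk (matrix : List (List Int)) (rows cols : Int) (i j : Int) (diagonal : List Int) : List Int :=
  if i < rows ∧ j < cols then
    seWalk matrix rows cols (i + 1) (j + 1)
      (diagonal ++ [PySem.List.pyGetD (PySem.List.pyGetD matrix i []) j 0])
  else diagonal
termination_by (rows - i).toNat
decreasing_by omega

def read_south_east_diagonals (matrix : List (List Int)) : List (List Int) :=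
  let rows : Int := matrix.length
  let cols : Int := (PySem.List.pyGetD matrix 0 []).length
  (PySem.List.pyRange 0 (rows + cols - 1) 1).foldl
    (fun acc d =>
      let ij : Int × Int := if d < cols then (0, cols - d - 1) else (d - cols + 1, 0)
      acc ++ [seWalk matrix rows cols ij.1 ij.2 []]) []

-- ===== PORT B =====
def read_south_east_diagonals_alt (matrix : List (List Int)) : List (List Int) :=
  let rows : Int := matrix.length
  let cols : Int := (PySem.List.pyGetD matrix 0 []).length
  -- 'groups.setdefault(i - j, []).append(row[j])' sets groups[i-j] to groups.get(i-j, []) ++ [row[j]]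
  -- (new keys appended at the end), which is exactly Dict.modify
  let groups : PySem.Dict Int (List Int) :=
    (PySem.List.pyRange 0 rows 1).foldl (fun g i =>
      let row := PySem.List.pyGetD matrix i []
      (PySem.List.pyRange 0 cols 1).foldl (fun g j =>
        g.modify (i - j) [] (· ++ [PySem.List.pyGetD row j 0])) g)
      PySem.Dict.empty
  (PySem.List.pyRange (-(cols - 1)) rows 1).map (fun k => groups.getD k [])

-- ===== PRECONDITION & SPEC =====
-- Pre_ excludes exactly the inputs where the Python raises IndexError: the empty matrix
-- (matrix[0]) and ragged matrices with some row shorter than the first row (matrix[i][j]).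
def Pre_read_south_east_diagonals (matrix : List (List Int)) : Prop :=
  matrix ≠ [] ∧ ∀ row ∈ matrix, matrix.headI.length ≤ row.length
instance (matrix : List (List Int)) : Decidable (Pre_read_south_east_diagonals matrix) := by
  unfold Pre_read_south_east_diagonals; infer_instance

def pvWitness_read_south_east_diagonals : List (List Int) := [[1, 2], [3, 4]]

def Spec_read_south_east_diagonals (matrix : List (List Int)) (out : List (List Int)) : Prop := out = read_south_east_diagonals_alt matrix
instance (matrix : List (List Int)) (out : List (List Int)) : Decidable (Spec_read_south_east_diagonals matrix out) := by unfold Spec_read_south_east_diagonals; infer_instance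

-- ===== CLAIM (what is proved, stated in full; the proofs are below) =====
def Claim_equal_read_south_east_diagonals : Prop := ∀ (matrix : List (List Int)), Dom_read_south_east_diagonals matrix → Pre_read_south_east_diagonals matrix → Spec_read_south_east_diagonals matrix (read_south_east_diagonals matrix)

-- ===== LEMMAS AND PROOFS =====

-- the element on diagonal k at row t (with the ports' shared out-of-range defaults)
def seEl (matrix : List (List Int)) (k t : Int) : Int :=
  PySem.List.pyGetD (PySem.List.pyGetD matrix t []) (t - k) 0

lemma seWalk_acc_aux (matrix : List (List Int)) (rows cols : Int) :
    ∀ (n : Nat) (i j : Int) (acc : List Int), (rows - i).toNat ≤ n →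
      seWalk matrix rows cols i j acc = acc ++ seWalk matrix rows cols i j [] := by
  intro n
  induction n with
  | zero =>
    intro i j acc hn
    have h : ¬ (i < rows ∧ j < cols) := by omega
    rw [seWalk.eq_def, if_neg h]
    rw [seWalk.eq_def, if_neg h]
    simp
  | succ n ih =>
    intro i j acc hn
    by_cases h : i < rows ∧ j < cols
    · rw [seWalk.eq_def, if_pos h, ih (i + 1) (j + 1) _ (by omega)]
      conv_rhs => rw [seWalk.eq_def]
      rw [if_pos h, ih (i + 1) (j + 1) ([] ++ _) (by omega)]
      simp
    · rw [seWalk.eq_def, if_neg h]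
      rw [seWalk.eq_def, if_neg h]
      simp

lemma seWalk_eq (matrix : List (List Int)) (rows cols : Int) :
    ∀ (n : Nat) (i j : Int), (rows - i).toNat ≤ n →
      seWalk matrix rows cols i j [] =
        (PySem.List.pyRange i (min rows (i - j + cols)) 1).map (seEl matrix (i - j)) := by
  intro n
  induction n with
  | zero =>
    intro i j hn
    have h : ¬ (i < rows ∧ j < cols) := by omega
    rw [seWalk, if_neg h, PySem.List.pyRange_one_eq_nil (by omega)]
    simp
  | succ n ih =>
    intro i j hn
    by_cases h : i < rows ∧ j < cols
    · rw [seWalk, if_pos h, seWalk_acc_aux matrix rows cols (n + 1) _ _ _ (by omega),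
        ih (i + 1) (j + 1) (by omega)]
      rw [PySem.List.pyRange_one_cons (by omega : i < min rows (i - j + cols))]
      have h2 : (i + 1) - (j + 1) = i - j := by omega
      rw [h2, List.map_cons]
      have h3 : seEl matrix (i - j) i = PySem.List.pyGetD (PySem.List.pyGetD matrix i []) j 0 := by
        unfold seEl
        congr 1
        omega
      rw [h3]
      simp
    · rw [seWalk, if_neg h, PySem.List.pyRange_one_eq_nil (by omega)]
      simp

-- nested fold = fold over the flattened pair list
lemma foldl_foldl_flatMap {α β γ : Type} (f : γ → β → γ) (g : α → List β) :
    ∀ (l : List α) (init : γ),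
      l.foldl (fun d a => (g a).foldl f d) init = (l.flatMap g).foldl f init := by
  intro l
  induction l with
  | nil => intro init; simp
  | cons a t ih => intro init; simp [List.foldl_append, ih]

lemma filter_eq_of_nodup {α : Type} [DecidableEq α] (c : α) :
    ∀ (l : List α), l.Nodup → l.filter (fun x => x == c) = if c ∈ l then [c] else [] := by
  intro l
  induction l with
  | nil => simp
  | cons a t ih =>
    intro h
    rcases List.nodup_cons.mp h with ⟨ha, ht⟩
    by_cases hac : a = c
    · subst hac
      rw [List.filter_cons, ih ht, if_neg ha]
      simp
    · rw [List.filter_cons, ih ht]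
      simp [hac, Ne.symm hac]

-- a range-fold of interval-guarded singletons is a map over the clipped range
lemma flatMap_ite_interval (c d : Int) (f : Int → Int) :
    ∀ (a b : Int),
      (PySem.List.pyRange a b 1).flatMap (fun i => if c ≤ i ∧ i < d then [f i] else []) =
        (PySem.List.pyRange (max a c) (min b d) 1).map f := by
  intro a b
  by_cases hab : b ≤ a
  · rw [PySem.List.pyRange_one_eq_nil hab, PySem.List.pyRange_one_eq_nil (by omega)]
    simp
  · have hlt : a < b := by omega
    have : ((b - (a + 1)).toNat) < ((b - a).toNat) := by omega
    rw [PySem.List.pyRange_one_cons hlt, List.flatMap_cons, flatMap_ite_interval c d f (a + 1) b]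
    by_cases h1 : c ≤ a ∧ a < d
    · have hm1 : max a c = a := by omega
      have hm2 : max (a + 1) c = a + 1 := by omega
      rw [if_pos h1, hm1, hm2, PySem.List.pyRange_one_cons (show a < min b d by omega)]
      simp
    · rw [if_neg h1, List.nil_append]
      by_cases h2 : a < c
      · have : max (a + 1) c = max a c := by omega
        rw [this]
      · have hd : d ≤ a := by omega
        rw [PySem.List.pyRange_one_eq_nil (by omega), PySem.List.pyRange_one_eq_nil (by omega)]
termination_by a b => (b - a).toNat

-- B's dict lookup at key k is the clipped-interval map of diagonal k
lemma groups_getD (matrix : List (List Int)) (rows cols : Int) (k : Int) :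
    ((PySem.List.pyRange 0 rows 1).foldl (fun g i =>
        (PySem.List.pyRange 0 cols 1).foldl (fun g j =>
          g.modify (i - j) [] (· ++ [PySem.List.pyGetD (PySem.List.pyGetD matrix i []) j 0])) g)
      PySem.Dict.empty).getD k [] =
    (PySem.List.pyRange (max 0 k) (min rows (k + cols)) 1).map (seEl matrix k) := by
  have step1 : ∀ (i : Int) (g : PySem.Dict Int (List Int)),
      (PySem.List.pyRange 0 cols 1).foldl (fun g j =>
          g.modify (i - j) [] (· ++ [PySem.List.pyGetD (PySem.List.pyGetD matrix i []) j 0])) g =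
      ((PySem.List.pyRange 0 cols 1).map
          (fun j => (i - j, PySem.List.pyGetD (PySem.List.pyGetD matrix i []) j 0))).foldl
        (fun d p => d.modify p.1 [] (· ++ [p.2])) g := by
    intro i g
    rw [List.foldl_map]
  simp only [step1]
  rw [foldl_foldl_flatMap, PySem.Dict.getD_foldl_modify_append,
    PySem.Dict.getD_empty, List.nil_append, List.filter_flatMap]
  have row : ∀ i : Int,
      (((PySem.List.pyRange 0 cols 1).map
          (fun j => (i - j, PySem.List.pyGetD (PySem.List.pyGetD matrix i []) j 0))).filter
        (fun p => p.1 == k)).map (·.2) =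
      (if k ≤ i ∧ i < k + cols then [seEl matrix k i] else []) := by
    intro i
    rw [List.filter_map, List.map_map]
    have hcond : ((fun p : Int × Int => p.1 == k) ∘
        (fun j => (i - j, PySem.List.pyGetD (PySem.List.pyGetD matrix i []) j 0))) =
        (fun j => j == i - k) := by
      funext j
      simp only [Function.comp]
      by_cases h : i - j = k
      · simp [show j = i - k by omega]
      · simp [h, show j ≠ i - k by omega]
    rw [hcond, filter_eq_of_nodup (i - k) _ (PySem.List.nodup_pyRange_one 0 cols)]
    by_cases hm : (i - k) ∈ PySem.List.pyRange 0 cols 1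
    · have := (PySem.List.mem_pyRange_one).mp hm
      rw [if_pos hm, if_pos (by omega)]
      simp [seEl]
    · have : ¬ (0 ≤ i - k ∧ i - k < cols) := fun h => hm (PySem.List.mem_pyRange_one.mpr h)
      rw [if_neg hm, if_neg (by omega)]
      simp
  simp only [List.map_flatMap]
  calc (PySem.List.pyRange 0 rows 1).flatMap
        (fun i => (((PySem.List.pyRange 0 cols 1).map
            (fun j => (i - j, PySem.List.pyGetD (PySem.List.pyGetD matrix i []) j 0))).filter
          (fun p => p.1 == k)).map (·.2))
      = (PySem.List.pyRange 0 rows 1).flatMap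
          (fun i => if k ≤ i ∧ i < k + cols then [seEl matrix k i] else []) := by
        refine List.flatMap_congr ?_
        intro i _
        exact row i
    _ = (PySem.List.pyRange (max 0 k) (min rows (k + cols)) 1).map (seEl matrix k) :=
        flatMap_ite_interval k (k + cols) (seEl matrix k) 0 rows

-- ===== VERDICT (by name: the statement is the Claim_ definition above) =====
theorem read_south_east_diagonals_spec : Claim_equal_read_south_east_diagonals := by
  intro matrix _ _
  unfold Spec_read_south_east_diagonals read_south_east_diagonals read_south_east_diagonals_alt
  simp only [groups_getD]
  set R : Int := (matrix.length : Int) with hR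
  set C : Int := ((PySem.List.pyGetD matrix 0 []).length : Int) with hC
  rw [PySem.List.foldl_append_singleton_eq_map, List.nil_append]
  rw [PySem.List.pyRange_one 0 (R + C - 1), PySem.List.pyRange_one (-(C - 1)) R]
  have hN : (R - -(C - 1)) = R + C - 1 - 0 := by ring
  rw [hN, List.map_map, List.map_map]
  refine List.map_congr_left ?_
  intro t _
  simp only [Function.comp]
  set d : Int := 0 + (t : Int) with hd
  set k : Int := -(C - 1) + (t : Int) with hk
  have hdk : k = d - C + 1 := by omega
  by_cases h : d < C
  · rw [if_pos h]
    rw [seWalk_eq matrix R C (R - 0).toNat 0 (C - d - 1) (by omega)]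
    have e1 : (0 : Int) - (C - d - 1) = k := by omega
    have e2 : min R (0 - (C - d - 1) + C) = min R (k + C) := by omega
    have e3 : max 0 k = 0 := by omega
    rw [e2, e1, e3]
  · rw [if_neg h]
    rw [seWalk_eq matrix R C (R - (d - C + 1)).toNat (d - C + 1) 0 (by omega)]
    have e1 : (d - C + 1) - 0 = k := by omega
    have e2 : min R (d - C + 1 - 0 + C) = min R (k + C) := by omega
    have e3 : max 0 k = d - C + 1 := by omega
    rw [e2, e1, e3]
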